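-- pv_equiv track=rewrite | github.com/FEPrep/parser | parser/question_extraction.py | largest_subsequence_of_empty_strings
-- ===== SOURCE A (Python) =====
-- from typing import Dict, List
--
-- def largest_subsequence_of_empty_strings(text: List[str]) -> int:
--     """
--     Finds the length of the largest subsequence of empty strings in the given list.
--
--     This function iterates through the list of strings, counting consecutive empty strings
--     and returns the length of the longest such subsequence.
--
--     Args:
--         text (List[str]): A list of strings to analyze.
--     """
--     max_length = 0
--     current_length = 0
--
--     for string in text:
--         if string.strip() == "":
--             current_length += 1
--             max_length = max(max_length, current_length)
--         else:
--             current_length = 0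
--
--     return max_length
-- ===== SOURCE B (Python) =====
-- from itertools import groupby
-- from typing import List
--
-- def largest_subsequence_of_empty_strings(text: List[str]) -> int:
--     return max(
--         (sum(1 for _ in group)
--          for is_blank, group in groupby(text, key=lambda s: s.strip() == "")
--          if is_blank),
--         default=0,
--     )
-- ===== Notes on version B (the rewrite author's own statement) =====
-- stated objective: idiomatic
-- what changed: Replaces the current_length/max_length counter loop with itertools.groupby: split the list into maximal runs keyed by blankness, then take the max length over the blank runs with default 0.
import Mathlib
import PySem

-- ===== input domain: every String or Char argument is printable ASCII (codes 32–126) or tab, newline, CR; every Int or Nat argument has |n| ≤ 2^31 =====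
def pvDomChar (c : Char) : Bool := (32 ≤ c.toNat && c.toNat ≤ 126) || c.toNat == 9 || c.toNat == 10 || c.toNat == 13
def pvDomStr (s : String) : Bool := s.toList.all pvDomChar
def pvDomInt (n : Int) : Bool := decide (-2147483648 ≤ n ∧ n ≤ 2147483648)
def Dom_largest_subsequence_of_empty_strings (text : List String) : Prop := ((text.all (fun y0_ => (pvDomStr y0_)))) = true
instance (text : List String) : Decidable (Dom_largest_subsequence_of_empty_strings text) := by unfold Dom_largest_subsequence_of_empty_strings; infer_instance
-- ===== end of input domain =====

-- B replaces A's current/max counter loop by a groupby-style decomposition: split the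
-- list into maximal runs keyed by blankness, then take the max length over blank runs
-- (default 0).  Same asymptotic cost; objective: idiomatic.

-- ===== PORT A =====
-- for-loop over (max_length, current_length), literal transliteration
def largest_subsequence_of_empty_strings (text : List String) : Int :=
  (text.foldl
    (fun st s =>
      if PySem.Str.strip s == "" then (max st.1 (st.2 + 1), st.2 + 1)
      else (st.1, 0))
    ((0 : Int), (0 : Int))).1

-- ===== PORT B =====
-- groupby(text, key = blankness) as a run-length encoding of the blankness flags
def pvRunsOf : List Bool → List (Bool × Int)
  | [] => []
  | b :: bs =>
    match pvRunsOf bs with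
    | (k, n) :: rest => if k == b then (b, n + 1) :: rest else (b, 1) :: (k, n) :: rest
    | [] => [(b, 1)]

-- max(lengths of the groups whose key is True, default=0)
def pvMaxBlankRun (l : List (Bool × Int)) : Int :=
  (l.filter (·.1)).foldl (fun m p => max m p.2) 0

def largest_subsequence_of_empty_strings_alt (text : List String) : Int :=
  pvMaxBlankRun (pvRunsOf (text.map (fun s => PySem.Str.strip s == "")))

-- ===== PRECONDITION & SPEC =====
def Spec_largest_subsequence_of_empty_strings (text : List String) (out : Int) : Prop := out = largest_subsequence_of_empty_strings_alt text
instance (text : List String) (out : Int) : Decidable (Spec_largest_subsequence_of_empty_strings text out) := by unfold Spec_largest_subsequence_of_empty_strings; infer_instance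

-- ===== CLAIM (what is proved, stated in full; the proofs are below) =====
def Claim_equal_largest_subsequence_of_empty_strings : Prop := ∀ (text : List String), Dom_largest_subsequence_of_empty_strings text → Spec_largest_subsequence_of_empty_strings text (largest_subsequence_of_empty_strings text)

-- ===== LEMMAS AND PROOFS =====

-- A's loop with the running maximum dropped
def pvG : List String → Int → Int
  | [], _ => 0
  | s :: r, c =>
    if PySem.Str.strip s == "" then max (c + 1) (pvG r (c + 1)) else pvG r 0

theorem pv_foldl_max_shift (l : List (Bool × Int)) :
    ∀ a b : Int, l.foldl (fun m p => max m p.2) (max a b)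
      = max a (l.foldl (fun m p => max m p.2) b) := by
  induction l with
  | nil => intro a b; simp
  | cons p t ih =>
    intro a b
    simp only [List.foldl_cons, max_assoc]
    exact ih a (max b p.2)

theorem pv_maxBlankRun_nonneg (l : List (Bool × Int)) : 0 ≤ pvMaxBlankRun l := by
  have h := pv_foldl_max_shift (l.filter (·.1)) 0 0
  simp only [max_self] at h
  unfold pvMaxBlankRun
  rw [h]
  exact le_max_left _ _

theorem pv_runsOf_pos (bs : List Bool) : ∀ p ∈ pvRunsOf bs, 1 ≤ p.2 := by
  induction bs with
  | nil => simp [pvRunsOf]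
  | cons b t ih =>
    intro p hp
    rcases h : pvRunsOf t with _ | ⟨⟨k, n⟩, rest⟩ <;>
      simp only [pvRunsOf, h] at hp
    · simp at hp; simp [hp]
    · have hn := ih (k, n) (h ▸ List.mem_cons_self)
      simp only at hn
      split at hp
      · rcases List.mem_cons.1 hp with rfl | hp'
        · simpa using by omega
        · exact ih p (h ▸ List.mem_cons_of_mem _ hp')
      · rcases List.mem_cons.1 hp with rfl | hp'
        · simp
        · exact ih p (h ▸ hp')

-- the value of pvG on a runs decomposition
def pvK : List (Bool × Int) → Int → Int
  | [], _ => 0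
  | (true, n) :: rest, c => max (c + n) (pvMaxBlankRun rest)
  | (false, _) :: rest, _ => pvMaxBlankRun rest

theorem pv_g_eq_K (text : List String) :
    ∀ c : Int, pvG text c = pvK (pvRunsOf (text.map (fun s => PySem.Str.strip s == ""))) c := by
  induction text with
  | nil => intro c; simp [pvG, pvRunsOf, pvK]
  | cons s r ih =>
    intro c
    simp only [List.map_cons, pvRunsOf]
    rcases h : pvRunsOf (r.map (fun s => PySem.Str.strip s == "")) with _ | ⟨⟨k, n⟩, rest⟩ <;>
      by_cases hb : PySem.Str.strip s == ""
    · simp [pvG, hb, ih, h, pvK, pvMaxBlankRun]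
    · simp [pvG, hb, ih, h, pvK, pvMaxBlankRun]
    · have hn : (1 : Int) ≤ n := by
        have := pv_runsOf_pos _ (k, n) (h ▸ List.mem_cons_self); simpa using this
      simp only [pvG, hb, if_true, ih, h]
      cases k with
      | true =>
        simp only [beq_self_eq_true, if_true, pvK]
        omega
      | false =>
        simp [pvK, pvMaxBlankRun]
    · have hn : (1 : Int) ≤ n := by
        have := pv_runsOf_pos _ (k, n) (h ▸ List.mem_cons_self); simpa using this
      have hb' : (PySem.Str.strip s == "") = false := by simpa using hb
      simp only [pvG, hb', if_false, Bool.false_eq_true, ih, h]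
      cases k with
      | true =>
        show max (0 + n) _ = pvK ((false, 1) :: (true, n) :: rest) c
        simp only [pvK, pvMaxBlankRun, List.filter_cons]
        norm_num
        rw [show (max (0 : Int) n) = max n 0 from max_comm _ _,
          pv_foldl_max_shift (rest.filter (·.1)) n 0]
      | false =>
        simp [pvK]

theorem pv_loop_eq (text : List String) :
    ∀ m c : Int, 0 ≤ m →
      (text.foldl
        (fun st s =>
          if PySem.Str.strip s == "" then (max st.1 (st.2 + 1), st.2 + 1)
          else (st.1, 0)) (m, c)).1 = max m (pvG text c) := by
  induction text with
  | nil => intro m c hm; simp [pvG]; omega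
  | cons s r ih =>
    intro m c hm
    by_cases hb : PySem.Str.strip s == ""
    · simp only [List.foldl_cons, hb, if_true, pvG]
      rw [ih (max m (c + 1)) (c + 1) (by omega)]
      omega
    · have hb' : (PySem.Str.strip s == "") = false := by simpa using hb
      simp only [List.foldl_cons, hb', Bool.false_eq_true, if_false, pvG]
      exact ih m 0 hm

-- ===== VERDICT (by name: the statement is the Claim_ definition above) =====
theorem largest_subsequence_of_empty_strings_spec : Claim_equal_largest_subsequence_of_empty_strings := by
  intro text _
  unfold Spec_largest_subsequence_of_empty_strings largest_subsequence_of_empty_strings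
    largest_subsequence_of_empty_strings_alt
  rw [pv_loop_eq text 0 0 le_rfl, pv_g_eq_K text 0]
  rcases h : pvRunsOf (text.map (fun s => PySem.Str.strip s == "")) with _ | ⟨⟨k, n⟩, rest⟩
  · simp [pvK, pvMaxBlankRun]
  · have hn : (1 : Int) ≤ n := by
      have := pv_runsOf_pos _ (k, n) (h ▸ List.mem_cons_self); simpa using this
    have hrest := pv_maxBlankRun_nonneg rest
    cases k with
    | true =>
      simp only [pvK, pvMaxBlankRun, List.filter_cons, if_true,
        List.foldl_cons]
      rw [show (max (0 : Int) n) = max n 0 from max_comm _ _,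
        pv_foldl_max_shift (rest.filter (·.1)) n 0]
      unfold pvMaxBlankRun at hrest
      omega
    | false =>
      simp only [pvK, pvMaxBlankRun, List.filter_cons, Bool.false_eq_true,
        if_false]
      unfold pvMaxBlankRun at hrest
      omega
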